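-- pv_equiv track=rewrite | github.com/flypigzju/TileLevel | ops/expandshrink_basic.py | count_shrinkable_centers
-- ===== SOURCE A (Python) =====
-- from typing import List, Tuple
--
-- Point = Tuple[int, int]
--
-- def count_shrinkable_centers(points: List[Point]) -> int:
--     s = set(points)
--     if not s:
--         return 0
--
--     candidates = set()
--     for x, y in s:
--         candidates.add((x + 1, y + 1))
--         candidates.add((x + 1, y - 1))
--         candidates.add((x - 1, y + 1))
--         candidates.add((x - 1, y - 1))
--
--     cnt = 0
--     for cx, cy in candidates:
--         if ((cx - 1, cy - 1) in s and
--             (cx + 1, cy - 1) in s and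
--             (cx - 1, cy + 1) in s and
--             (cx + 1, cy + 1) in s):
--             cnt += 1
--     return cnt
-- ===== SOURCE B (Python) =====
-- from typing import List, Tuple
--
-- Point = Tuple[int, int]
--
-- def count_shrinkable_centers(points: List[Point]) -> int:
--     # Anchor each 2x2-diagonal square at its bottom-left corner: one pass over the set.
--     s = set(points)
--     cnt = 0
--     for x, y in s:
--         if (x + 2, y) in s and (x, y + 2) in s and (x + 2, y + 2) in s:
--             cnt += 1
--     return cnt
-- ===== Notes on version B (the rewrite author's own statement) =====
-- stated objective: simpler
-- what changed: B drops A's candidate-center set entirely: it anchors each square at its bottom-left corner and makes one pass over set(points), checking the three other corners, instead of generating up to 4n candidate centers and testing four corners for each.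
import Mathlib
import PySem

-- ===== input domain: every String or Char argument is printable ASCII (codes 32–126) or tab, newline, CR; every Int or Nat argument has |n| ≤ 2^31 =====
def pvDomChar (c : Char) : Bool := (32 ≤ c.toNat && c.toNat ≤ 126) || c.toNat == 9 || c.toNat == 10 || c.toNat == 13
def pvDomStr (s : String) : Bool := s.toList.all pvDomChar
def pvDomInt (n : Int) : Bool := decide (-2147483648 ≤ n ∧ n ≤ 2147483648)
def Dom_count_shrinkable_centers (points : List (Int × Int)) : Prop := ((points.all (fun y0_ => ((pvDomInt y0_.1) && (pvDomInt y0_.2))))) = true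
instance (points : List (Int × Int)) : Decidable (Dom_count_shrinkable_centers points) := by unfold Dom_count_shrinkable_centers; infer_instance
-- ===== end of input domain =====

-- B replaces A's candidate-center set by one pass over set(points), anchoring each square
-- at its bottom-left corner (objective: simpler). Return values are counts, independent of
-- set iteration order.

-- ===== PORT A =====
def count_shrinkable_centers (points : List (Int × Int)) : Int :=
  let s : PySem.Set (Int × Int) := PySem.Set.ofList points
  if s = [] then 0
  else
    let candidates : PySem.Set (Int × Int) :=
      s.foldl (fun c p =>
        PySem.Set.add (PySem.Set.add (PySem.Set.add (PySem.Set.add c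
          (p.1 + 1, p.2 + 1)) (p.1 + 1, p.2 - 1)) (p.1 - 1, p.2 + 1)) (p.1 - 1, p.2 - 1))
        PySem.Set.empty
    candidates.foldl (fun cnt c =>
      if PySem.Set.contains s (c.1 - 1, c.2 - 1) &&
         PySem.Set.contains s (c.1 + 1, c.2 - 1) &&
         PySem.Set.contains s (c.1 - 1, c.2 + 1) &&
         PySem.Set.contains s (c.1 + 1, c.2 + 1) then cnt + 1 else cnt) 0

-- ===== PORT B =====
def count_shrinkable_centers_alt (points : List (Int × Int)) : Int :=
  let s : PySem.Set (Int × Int) := PySem.Set.ofList points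
  s.foldl (fun cnt p =>
    if PySem.Set.contains s (p.1 + 2, p.2) &&
       PySem.Set.contains s (p.1, p.2 + 2) &&
       PySem.Set.contains s (p.1 + 2, p.2 + 2) then cnt + 1 else cnt) 0

-- ===== PRECONDITION & SPEC =====
def Spec_count_shrinkable_centers (points : List (Int × Int)) (out : Int) : Prop := out = count_shrinkable_centers_alt points
instance (points : List (Int × Int)) (out : Int) : Decidable (Spec_count_shrinkable_centers points out) := by unfold Spec_count_shrinkable_centers; infer_instance

-- ===== CLAIM (what is proved, stated in full; the proofs are below) =====
def Claim_equal_count_shrinkable_centers : Prop := ∀ (points : List (Int × Int)), Dom_count_shrinkable_centers points → Spec_count_shrinkable_centers points (count_shrinkable_centers points)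

-- ===== LEMMAS AND PROOFS =====

-- counting fold = countP
theorem foldl_if_count {α : Type} (p : α → Bool) :
    ∀ (xs : List α) (n : Int),
      xs.foldl (fun cnt x => if p x then cnt + 1 else cnt) n = n + (xs.countP p : Int) := by
  intro xs
  induction xs with
  | nil => intro n; simp
  | cons x xs ih =>
      intro n
      simp only [List.foldl_cons, List.countP_cons]
      by_cases h : p x = true
      · simp [h, ih]; ring
      · simp [h, ih]

-- membership in A's candidate fold
theorem mem_candidates_fold (s : List (Int × Int)) :
    ∀ (acc : PySem.Set (Int × Int)) (y : Int × Int),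
      y ∈ s.foldl (fun c p =>
        PySem.Set.add (PySem.Set.add (PySem.Set.add (PySem.Set.add c
          (p.1 + 1, p.2 + 1)) (p.1 + 1, p.2 - 1)) (p.1 - 1, p.2 + 1)) (p.1 - 1, p.2 - 1)) acc
      ↔ y ∈ acc ∨ ∃ p ∈ s, y = (p.1 + 1, p.2 + 1) ∨ y = (p.1 + 1, p.2 - 1) ∨
          y = (p.1 - 1, p.2 + 1) ∨ y = (p.1 - 1, p.2 - 1) := by
  induction s with
  | nil => intro acc y; simp
  | cons q s ih =>
      intro acc y
      simp only [List.foldl_cons, ih, PySem.Set.mem_add, List.mem_cons]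
      constructor
      · rintro (((((h | h) | h) | h) | h) | ⟨p, hp, h⟩)
        · exact Or.inl h
        · exact Or.inr ⟨q, Or.inl rfl, Or.inl h⟩
        · exact Or.inr ⟨q, Or.inl rfl, Or.inr (Or.inl h)⟩
        · exact Or.inr ⟨q, Or.inl rfl, Or.inr (Or.inr (Or.inl h))⟩
        · exact Or.inr ⟨q, Or.inl rfl, Or.inr (Or.inr (Or.inr h))⟩
        · exact Or.inr ⟨p, Or.inr hp, h⟩
      · rintro (h | ⟨p, hp | hp, h⟩)
        · exact Or.inl (Or.inl (Or.inl (Or.inl (Or.inl h))))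
        · subst hp
          rcases h with h | h | h | h
          · exact Or.inl (Or.inl (Or.inl (Or.inl (Or.inr h))))
          · exact Or.inl (Or.inl (Or.inl (Or.inr h)))
          · exact Or.inl (Or.inl (Or.inr h))
          · exact Or.inl (Or.inr h)
        · exact Or.inr ⟨p, hp, h⟩

theorem nodup_candidates_fold (s : List (Int × Int)) :
    ∀ (acc : PySem.Set (Int × Int)), acc.Nodup →
      (s.foldl (fun c p =>
        PySem.Set.add (PySem.Set.add (PySem.Set.add (PySem.Set.add c
          (p.1 + 1, p.2 + 1)) (p.1 + 1, p.2 - 1)) (p.1 - 1, p.2 + 1)) (p.1 - 1, p.2 - 1)) acc).Nodup := by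
  induction s with
  | nil => intro acc h; simpa using h
  | cons q s ih =>
      intro acc h
      exact ih _ (PySem.Set.nodup_add _ _ (PySem.Set.nodup_add _ _ (PySem.Set.nodup_add _ _ (PySem.Set.nodup_add _ _ h))))

theorem count_shrinkable_centers_spec_aux (points : List (Int × Int)) :
    count_shrinkable_centers points = count_shrinkable_centers_alt points := by
  unfold count_shrinkable_centers count_shrinkable_centers_alt
  set s : PySem.Set (Int × Int) := PySem.Set.ofList points with hs
  by_cases hnil : s = []
  · simp [hnil]
  · simp only [hnil, ite_false]
    set P : Int × Int → Bool := fun c =>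
      PySem.Set.contains s (c.1 - 1, c.2 - 1) &&
      PySem.Set.contains s (c.1 + 1, c.2 - 1) &&
      PySem.Set.contains s (c.1 - 1, c.2 + 1) &&
      PySem.Set.contains s (c.1 + 1, c.2 + 1) with hP
    set Q : Int × Int → Bool := fun p =>
      PySem.Set.contains s (p.1 + 2, p.2) &&
      PySem.Set.contains s (p.1, p.2 + 2) &&
      PySem.Set.contains s (p.1 + 2, p.2 + 2) with hQ
    set cands := s.foldl (fun c p =>
        PySem.Set.add (PySem.Set.add (PySem.Set.add (PySem.Set.add c
          (p.1 + 1, p.2 + 1)) (p.1 + 1, p.2 - 1)) (p.1 - 1, p.2 + 1)) (p.1 - 1, p.2 - 1))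
        PySem.Set.empty with hc
    rw [foldl_if_count P cands 0, foldl_if_count Q s 0]
    have hsnd : s.Nodup := PySem.Set.nodup_ofList points
    have hcn : cands.Nodup := by
      rw [hc]; exact nodup_candidates_fold s PySem.Set.empty List.nodup_nil
    -- filtered candidate list ~ image under (+1,+1) of filtered s
    have key : cands.countP P = ((s.filter Q).map (fun p => (p.1 + 1, p.2 + 1))).length := by
      rw [List.countP_eq_length_filter]
      apply List.Perm.length_eq
      apply (List.perm_ext_iff_of_nodup (List.Nodup.filter _ hcn) ?_).mpr
      · intro c
        simp only [List.mem_filter, List.mem_map]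
        constructor
        · rintro ⟨hcmem, hPc⟩
          simp only [hP, Bool.and_eq_true, PySem.Set.contains_iff] at hPc
          obtain ⟨⟨⟨h1, h2⟩, h3⟩, h4⟩ := hPc
          refine ⟨(c.1 - 1, c.2 - 1), ⟨h1, ?_⟩, by simp⟩
          simp only [hQ, Bool.and_eq_true, PySem.Set.contains_iff]
          refine ⟨⟨?_, ?_⟩, ?_⟩
          · convert h2 using 2 <;> ring
          · convert h3 using 2 <;> ring
          · convert h4 using 2 <;> ring
        · rintro ⟨p, ⟨hps, hQp⟩, rfl⟩
          simp only [hQ, Bool.and_eq_true, PySem.Set.contains_iff] at hQp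
          obtain ⟨⟨h1, h2⟩, h3⟩ := hQp
          constructor
          · rw [hc, mem_candidates_fold]
            exact Or.inr ⟨p, hps, Or.inl rfl⟩
          · simp only [hP, Bool.and_eq_true, PySem.Set.contains_iff]
            refine ⟨⟨⟨?_, ?_⟩, ?_⟩, ?_⟩
            · simpa using hps
            · convert h1 using 2 <;> ring
            · convert h2 using 2 <;> ring
            · convert h3 using 2 <;> ring
      · apply List.Nodup.map ?_ (List.Nodup.filter _ hsnd)
        intro a b hab
        have h1 : a.1 + 1 = b.1 + 1 := congrArg Prod.fst hab
        have h2 : a.2 + 1 = b.2 + 1 := congrArg Prod.snd hab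
        exact Prod.ext (by omega) (by omega)
    rw [key]
    simp [List.countP_eq_length_filter]

-- ===== VERDICT (by name: the statement is the Claim_ definition above) =====
theorem count_shrinkable_centers_spec : Claim_equal_count_shrinkable_centers := by
  intro points _
  exact count_shrinkable_centers_spec_aux points
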